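-- pv_equiv track=rewrite | github.com/Adam0s007/DSA | dynamic programming/bit algo/zad11ProstokatnyKawalekTkaniny.py | tkanina
-- ===== SOURCE A (Python) =====
-- def tkanina(P,M):
--     dp = [[0 for i in range(P[1]+1)] for j in range(P[0]+1)]
--     for szer in range(P[0]+1):
--         for wys in range(P[1]+1):
--             for k in range(len(M)):
--                 #material mozemy pociac w pionie lub tez w poziomie stad te dwa ify i totalH oraz totalV
--                 totalH = 0
--                 if szer-M[k][0] >=0 and wys-M[k][1] >=0:
--                     total1 =  dp[szer-M[k][0]][wys]
--                     total2 = dp[M[k][0]][wys-M[k][1]]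
--                     totalH = M[k][2] + total1 + total2
--
--                 totalV = 0
--                 if szer-M[k][1] >=0 and wys-M[k][0] >=0:
--                     total3 = dp[szer-M[k][1]][wys]
--                     total4 =  dp[M[k][1]][wys-M[k][0]]
--                     totalV = M[k][2] + total3 + total4
--
--                 dp[szer][wys] = max(dp[szer][wys],max(totalH,totalV))
--
--     return dp[szer][wys]
-- ===== SOURCE B (Python) =====
-- def tkanina(P, M):
--     # top-down memoized recursion over only the (width, height) states actually reachable
--     memo = {}
--
--     def best(w, h):
--         key = (w, h)
--         if key in memo:
--             return memo[key]
--         res = 0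
--         for a, b, v in M:
--             if w - a >= 0 and h - b >= 0:
--                 res = max(res, v + best(w - a, h) + best(a, h - b))
--             if w - b >= 0 and h - a >= 0:
--                 res = max(res, v + best(w - b, h) + best(b, h - a))
--         memo[key] = res
--         return res
--
--     return best(P[0], P[1])
-- ===== Notes on version B (the rewrite author's own statement) =====
-- stated objective: alternative
-- what changed: Replaces A's full bottom-up P[0]x P[1] table fill with top-down memoized recursion best(w,h) that computes only the (width,height) states actually reachable by cuts, flooring each state at 0 via the same horizontal/vertical options.
-- outside the precondition, e.g. on tkanina((1, 1), [(0, 1, 5)]): A returns 10, B raises RecursionError; on tkanina((1, 1), [(-1, 1, 5)]): A raises IndexError, B raises RecursionError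
import Mathlib
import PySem

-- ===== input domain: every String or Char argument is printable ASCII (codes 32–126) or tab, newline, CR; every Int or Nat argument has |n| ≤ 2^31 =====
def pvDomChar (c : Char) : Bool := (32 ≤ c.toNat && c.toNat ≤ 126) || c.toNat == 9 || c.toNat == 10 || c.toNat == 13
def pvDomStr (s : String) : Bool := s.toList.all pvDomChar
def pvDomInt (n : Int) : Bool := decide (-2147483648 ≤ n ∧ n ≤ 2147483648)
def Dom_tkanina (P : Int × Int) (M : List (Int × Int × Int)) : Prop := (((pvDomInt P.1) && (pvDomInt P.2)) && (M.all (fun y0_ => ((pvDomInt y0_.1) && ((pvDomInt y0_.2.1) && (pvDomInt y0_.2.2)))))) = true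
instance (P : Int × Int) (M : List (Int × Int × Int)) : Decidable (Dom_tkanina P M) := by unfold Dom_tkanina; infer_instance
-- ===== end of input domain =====

-- B replaces A's full bottom-up table with top-down memoized recursion that fills only reachable (width,height) states (objective: alternative decomposition).

-- ===== PORT A =====
-- dp[i][j] read and in-place write helpers (exact pyGetD/pySetD chains)
def cellA (dp : List (List Int)) (i j : Int) : Int :=
  PySem.List.pyGetD (PySem.List.pyGetD dp i []) j 0
def setCellA (dp : List (List Int)) (i j : Int) (v : Int) : List (List Int) :=
  PySem.List.pySetD dp i (PySem.List.pySetD (PySem.List.pyGetD dp i []) j v)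

-- body of A's innermost 'for k in range(len(M))' iteration
def tkaBody (szer wys : Int) (dp : List (List Int)) (mk : Int × Int × Int) : List (List Int) :=
  let totalH : Int :=
    if szer - mk.1 ≥ 0 ∧ wys - mk.2.1 ≥ 0 then
      mk.2.2 + cellA dp (szer - mk.1) wys + cellA dp mk.1 (wys - mk.2.1)
    else 0
  let totalV : Int :=
    if szer - mk.2.1 ≥ 0 ∧ wys - mk.1 ≥ 0 then
      mk.2.2 + cellA dp (szer - mk.2.1) wys + cellA dp mk.2.1 (wys - mk.1)
    else 0
  setCellA dp szer wys (max (cellA dp szer wys) (max totalH totalV))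

def tkaInner (M : List (Int × Int × Int)) (szer wys : Int) (dp : List (List Int)) : List (List Int) :=
  (PySem.List.pyRange 0 (PySem.List.len M) 1).foldl
    (fun dp k => tkaBody szer wys dp (PySem.List.pyGetD M k (0, 0, 0))) dp

def tkanina (P : Int × Int) (M : List (Int × Int × Int)) : Int :=
  let dp0 : List (List Int) :=
    (PySem.List.pyRange 0 (P.1 + 1) 1).map (fun _ =>
      (PySem.List.pyRange 0 (P.2 + 1) 1).map (fun _ => (0 : Int)))
  let dp := (PySem.List.pyRange 0 (P.1 + 1) 1).foldl (fun dp szer =>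
      (PySem.List.pyRange 0 (P.2 + 1) 1).foldl (fun dp wys =>
        tkaInner M szer wys dp) dp) dp0
  -- 'return dp[szer][wys]' : under Pre_ the loop variables end at P.1, P.2
  cellA dp P.1 P.2

-- ===== PORT B =====
-- memoized 'best(w, h)' of Source B; the Nat argument is pure fuel making the
-- recursion structural (under Pre_ the initial fuel is never exhausted)
def bestGo (M : List (Int × Int × Int)) :
    Nat → PySem.Dict (Int × Int) Int → Int → Int → Int × PySem.Dict (Int × Int) Int
  | 0, memo, _, _ => (0, memo)
  | n + 1, memo, w, h =>
    match memo.get? (w, h) with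
    | some x => (x, memo)
    | none =>
      let st := M.foldl (fun (st : Int × PySem.Dict (Int × Int) Int) m =>
        let st :=
          if w - m.1 ≥ 0 ∧ h - m.2.1 ≥ 0 then
            let r1 := bestGo M n st.2 (w - m.1) h
            let r2 := bestGo M n r1.2 m.1 (h - m.2.1)
            (max st.1 (m.2.2 + r1.1 + r2.1), r2.2)
          else st
        if w - m.2.1 ≥ 0 ∧ h - m.1 ≥ 0 then
          let r3 := bestGo M n st.2 (w - m.2.1) h
          let r4 := bestGo M n r3.2 m.2.1 (h - m.1)
          (max st.1 (m.2.2 + r3.1 + r4.1), r4.2)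
        else st) (0, memo)
      (st.1, st.2.insert (w, h) st.1)

def tkanina_alt (P : Int × Int) (M : List (Int × Int × Int)) : Int :=
  (bestGo M ((P.1 + P.2).toNat + 1) PySem.Dict.empty P.1 P.2).1

-- ===== PRECONDITION & SPEC =====
-- Pre_ excludes negative target dimensions (A hits NameError) and materials with a
-- nonpositive width/height that fit inside the target in some orientation: there A
-- raises IndexError or, when it does return, the value comes from reading
-- partially-updated / negatively-wrapped table cells, while B's recursion does not
-- terminate (RecursionError). Nonpositive-dimension materials too large to ever fit
-- are inert in both programs and stay inside Pre_.
def Pre_tkanina (P : Int × Int) (M : List (Int × Int × Int)) : Prop :=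
  0 ≤ P.1 ∧ 0 ≤ P.2 ∧ ∀ m ∈ M, (1 ≤ m.1 ∧ 1 ≤ m.2.1) ∨
    (¬ (m.1 ≤ P.1 ∧ m.2.1 ≤ P.2) ∧ ¬ (m.2.1 ≤ P.1 ∧ m.1 ≤ P.2))
instance (P : Int × Int) (M : List (Int × Int × Int)) : Decidable (Pre_tkanina P M) := by
  unfold Pre_tkanina; infer_instance

def pvWitness_tkanina : (Int × Int) × (List (Int × Int × Int)) :=
  ((2, 3), [(1, 1, 2), (1, 2, 5)])

def Spec_tkanina (P : Int × Int) (M : List (Int × Int × Int)) (out : Int) : Prop := out = tkanina_alt P M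
instance (P : Int × Int) (M : List (Int × Int × Int)) (out : Int) : Decidable (Spec_tkanina P M out) := by unfold Spec_tkanina; infer_instance

-- ===== CLAIM (what is proved, stated in full; the proofs are below) =====
def Claim_equal_tkanina : Prop := ∀ (P : Int × Int) (M : List (Int × Int × Int)), Dom_tkanina P M → Pre_tkanina P M → Spec_tkanina P M (tkanina P M)

-- ===== LEMMAS AND PROOFS =====

-- the common value both programs compute: the optimal-cut value, as a
-- fuel-indexed recurrence (tkaF) and its stabilized form (tkaV)
def tkaF (M : List (Int × Int × Int)) : Nat → Int → Int → Int
  | 0, _, _ => 0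
  | n + 1, w, h =>
    M.foldl (fun res m =>
      max res (max
        (if w - m.1 ≥ 0 ∧ h - m.2.1 ≥ 0 then
          m.2.2 + tkaF M n (w - m.1) h + tkaF M n m.1 (h - m.2.1) else 0)
        (if w - m.2.1 ≥ 0 ∧ h - m.1 ≥ 0 then
          m.2.2 + tkaF M n (w - m.2.1) h + tkaF M n m.2.1 (h - m.1) else 0))) 0

def tkaV (M : List (Int × Int × Int)) (w h : Int) : Int := tkaF M ((w + h).toNat + 1) w h

-- every material is positive-dimensional or can never fit in a (R-1) x (C-1) target
def tkaOk (R C : Int) (M : List (Int × Int × Int)) : Prop :=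
  ∀ m ∈ M, (1 ≤ m.1 ∧ 1 ≤ m.2.1) ∨
    (¬ (m.1 ≤ R - 1 ∧ m.2.1 ≤ C - 1) ∧ ¬ (m.2.1 ≤ R - 1 ∧ m.1 ≤ C - 1))

-- A's one-k step of the max, with finalized values plugged in
def aPure (M : List (Int × Int × Int)) (w h res : Int) (m : Int × Int × Int) : Int :=
  max res (max
    (if w - m.1 ≥ 0 ∧ h - m.2.1 ≥ 0 then
      m.2.2 + tkaV M (w - m.1) h + tkaV M m.1 (h - m.2.1) else 0)
    (if w - m.2.1 ≥ 0 ∧ h - m.1 ≥ 0 then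
      m.2.2 + tkaV M (w - m.2.1) h + tkaV M m.2.1 (h - m.1) else 0))

lemma tkaF_fuel (M : List (Int × Int × Int)) (R C : Int) (hok : tkaOk R C M) :
    ∀ (k : Nat) (w h : Int) (n m : Nat), 0 ≤ w → 0 ≤ h → w ≤ R - 1 → h ≤ C - 1 →
      (w + h).toNat ≤ k → (w + h).toNat < n → (w + h).toNat < m →
      tkaF M n w h = tkaF M m w h := by
  intro k
  induction k using Nat.strong_induction_on with
  | h k IH =>
  intro w h n m hw hh hwB hhB hk hn hm
  obtain ⟨n', rfl⟩ : ∃ n', n = n' + 1 := ⟨n - 1, by omega⟩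
  obtain ⟨m', rfl⟩ : ∃ m', m = m' + 1 := ⟨m - 1, by omega⟩
  simp only [tkaF]
  refine PySem.List.foldl_congr_mem _ _ _ _ ?_
  intro acc x hx
  have e1 : (if w - x.1 ≥ 0 ∧ h - x.2.1 ≥ 0 then
        x.2.2 + tkaF M n' (w - x.1) h + tkaF M n' x.1 (h - x.2.1) else 0)
      = (if w - x.1 ≥ 0 ∧ h - x.2.1 ≥ 0 then
        x.2.2 + tkaF M m' (w - x.1) h + tkaF M m' x.1 (h - x.2.1) else 0) := by
    split_ifs with hg
    · obtain ⟨h1, h2⟩ := hg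
      rcases hok x hx with ⟨ha, hb⟩ | ⟨hi1, hi2⟩
      · rw [IH (w - x.1 + h).toNat (by omega) (w - x.1) h n' m' (by omega) hh (by omega) hhB le_rfl (by omega) (by omega),
            IH (x.1 + (h - x.2.1)).toNat (by omega) x.1 (h - x.2.1) n' m' (by omega) (by omega) (by omega) (by omega) le_rfl (by omega) (by omega)]
      · exact (False.elim (by omega))
    · rfl
  have e2 : (if w - x.2.1 ≥ 0 ∧ h - x.1 ≥ 0 then
        x.2.2 + tkaF M n' (w - x.2.1) h + tkaF M n' x.2.1 (h - x.1) else 0)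
      = (if w - x.2.1 ≥ 0 ∧ h - x.1 ≥ 0 then
        x.2.2 + tkaF M m' (w - x.2.1) h + tkaF M m' x.2.1 (h - x.1) else 0) := by
    split_ifs with hg
    · obtain ⟨h1, h2⟩ := hg
      rcases hok x hx with ⟨ha, hb⟩ | ⟨hi1, hi2⟩
      · rw [IH (w - x.2.1 + h).toNat (by omega) (w - x.2.1) h n' m' (by omega) hh (by omega) hhB le_rfl (by omega) (by omega),
            IH (x.2.1 + (h - x.1)).toNat (by omega) x.2.1 (h - x.1) n' m' (by omega) (by omega) (by omega) (by omega) le_rfl (by omega) (by omega)]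
      · exact (False.elim (by omega))
    · rfl
  rw [e1, e2]

lemma tkaV_rec (M : List (Int × Int × Int)) (R C : Int) (hok : tkaOk R C M) (w h : Int)
    (hw : 0 ≤ w) (hh : 0 ≤ h) (hwB : w ≤ R - 1) (hhB : h ≤ C - 1) :
    tkaV M w h = M.foldl (aPure M w h) 0 := by
  show tkaF M ((w + h).toNat + 1) w h = _
  simp only [tkaF]
  refine PySem.List.foldl_congr_mem _ _ _ _ ?_
  intro acc x hx
  unfold aPure
  have e1 : (if w - x.1 ≥ 0 ∧ h - x.2.1 ≥ 0 then
        x.2.2 + tkaF M (w + h).toNat (w - x.1) h + tkaF M (w + h).toNat x.1 (h - x.2.1) else 0)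
      = (if w - x.1 ≥ 0 ∧ h - x.2.1 ≥ 0 then
        x.2.2 + tkaV M (w - x.1) h + tkaV M x.1 (h - x.2.1) else 0) := by
    split_ifs with hg
    · obtain ⟨h1, h2⟩ := hg
      rcases hok x hx with ⟨ha, hb⟩ | ⟨hi1, hi2⟩
      · unfold tkaV
        rw [tkaF_fuel M R C hok (w + h).toNat (w - x.1) h ((w + h).toNat) ((w - x.1 + h).toNat + 1) (by omega) hh (by omega) hhB (by omega) (by omega) (by omega),
            tkaF_fuel M R C hok (w + h).toNat x.1 (h - x.2.1) ((w + h).toNat) ((x.1 + (h - x.2.1)).toNat + 1) (by omega) (by omega) (by omega) (by omega) (by omega) (by omega) (by omega)]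
      · exact (False.elim (by omega))
    · rfl
  have e2 : (if w - x.2.1 ≥ 0 ∧ h - x.1 ≥ 0 then
        x.2.2 + tkaF M (w + h).toNat (w - x.2.1) h + tkaF M (w + h).toNat x.2.1 (h - x.1) else 0)
      = (if w - x.2.1 ≥ 0 ∧ h - x.1 ≥ 0 then
        x.2.2 + tkaV M (w - x.2.1) h + tkaV M x.2.1 (h - x.1) else 0) := by
    split_ifs with hg
    · obtain ⟨h1, h2⟩ := hg
      rcases hok x hx with ⟨ha, hb⟩ | ⟨hi1, hi2⟩
      · unfold tkaV
        rw [tkaF_fuel M R C hok (w + h).toNat (w - x.2.1) h ((w + h).toNat) ((w - x.2.1 + h).toNat + 1) (by omega) hh (by omega) hhB (by omega) (by omega) (by omega),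
            tkaF_fuel M R C hok (w + h).toNat x.2.1 (h - x.1) ((w + h).toNat) ((x.2.1 + (h - x.1)).toNat + 1) (by omega) (by omega) (by omega) (by omega) (by omega) (by omega) (by omega)]
      · exact (False.elim (by omega))
    · rfl
  rw [e1, e2]

-- ---------- B side ----------

-- B's one-material step with finalized values: first the H option, then V
def bPureH (M : List (Int × Int × Int)) (w h res : Int) (m : Int × Int × Int) : Int :=
  if w - m.1 ≥ 0 ∧ h - m.2.1 ≥ 0 then
    max res (m.2.2 + tkaV M (w - m.1) h + tkaV M m.1 (h - m.2.1)) else res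
def bPure (M : List (Int × Int × Int)) (w h res : Int) (m : Int × Int × Int) : Int :=
  if w - m.2.1 ≥ 0 ∧ h - m.1 ≥ 0 then
    max (bPureH M w h res m) (m.2.2 + tkaV M (w - m.2.1) h + tkaV M m.2.1 (h - m.1))
  else bPureH M w h res m

def MInvB (M : List (Int × Int × Int)) (memo : PySem.Dict (Int × Int) Int) : Prop :=
  ∀ (p : Int × Int) (x : Int), memo.get? p = some x → x = tkaV M p.1 p.2

-- the fold body inside bestGo, named
def bStep (M : List (Int × Int × Int)) (n : Nat) (w h : Int)
    (st : Int × PySem.Dict (Int × Int) Int) (m : Int × Int × Int) :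
    Int × PySem.Dict (Int × Int) Int :=
  let st :=
    if w - m.1 ≥ 0 ∧ h - m.2.1 ≥ 0 then
      let r1 := bestGo M n st.2 (w - m.1) h
      let r2 := bestGo M n r1.2 m.1 (h - m.2.1)
      (max st.1 (m.2.2 + r1.1 + r2.1), r2.2)
    else st
  if w - m.2.1 ≥ 0 ∧ h - m.1 ≥ 0 then
    let r3 := bestGo M n st.2 (w - m.2.1) h
    let r4 := bestGo M n r3.2 m.2.1 (h - m.1)
    (max st.1 (m.2.2 + r3.1 + r4.1), r4.2)
  else st

lemma bestGo_succ_some (M : List (Int × Int × Int)) (n : Nat)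
    (memo : PySem.Dict (Int × Int) Int) (w h x : Int) (hget : memo.get? (w, h) = some x) :
    bestGo M (n + 1) memo w h = (x, memo) := by
  unfold bestGo; rw [hget]

lemma bestGo_succ_none (M : List (Int × Int × Int)) (n : Nat)
    (memo : PySem.Dict (Int × Int) Int) (w h : Int) (hget : memo.get? (w, h) = none) :
    bestGo M (n + 1) memo w h =
      ((M.foldl (bStep M n w h) (0, memo)).1,
       (M.foldl (bStep M n w h) (0, memo)).2.insert (w, h) (M.foldl (bStep M n w h) (0, memo)).1) := by
  unfold bestGo; rw [hget]; rfl

lemma bStep_eq (M : List (Int × Int × Int)) (R C : Int) (n : Nat) (w h : Int)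
    (hIH : ∀ (w' h' : Int) (memo : PySem.Dict (Int × Int) Int), 0 ≤ w' → 0 ≤ h' →
      w' ≤ R - 1 → h' ≤ C - 1 → (w' + h').toNat < n → MInvB M memo →
      (bestGo M n memo w' h').1 = tkaV M w' h' ∧ MInvB M (bestGo M n memo w' h').2)
    (m : Int × Int × Int)
    (hmok : (1 ≤ m.1 ∧ 1 ≤ m.2.1) ∨
      (¬ (m.1 ≤ R - 1 ∧ m.2.1 ≤ C - 1) ∧ ¬ (m.2.1 ≤ R - 1 ∧ m.1 ≤ C - 1)))
    (hw : 0 ≤ w) (hh : 0 ≤ h) (hwB : w ≤ R - 1) (hhB : h ≤ C - 1) (hfn : (w + h).toNat ≤ n)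
    (res : Int) (memo : PySem.Dict (Int × Int) Int) (hm : MInvB M memo) :
    (bStep M n w h (res, memo) m).1 = bPure M w h res m ∧
      MInvB M (bStep M n w h (res, memo) m).2 := by
  unfold bStep bPure bPureH
  by_cases g1 : w - m.1 ≥ 0 ∧ h - m.2.1 ≥ 0
  · obtain ⟨g1a, g1b⟩ := g1
    rcases hmok with ⟨ha, hb⟩ | ⟨hi1, hi2⟩
    · obtain ⟨e1, m1⟩ := hIH (w - m.1) h memo (by omega) hh (by omega) hhB (by omega) hm
      obtain ⟨e2, m2⟩ := hIH m.1 (h - m.2.1) (bestGo M n memo (w - m.1) h).2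
        (by omega) (by omega) (by omega) (by omega) (by omega) m1
      simp only [if_pos (⟨g1a, g1b⟩ : w - m.1 ≥ 0 ∧ h - m.2.1 ≥ 0)]
      by_cases g2 : w - m.2.1 ≥ 0 ∧ h - m.1 ≥ 0
      · obtain ⟨g2a, g2b⟩ := g2
        obtain ⟨e3, m3⟩ := hIH (w - m.2.1) h _ (by omega) hh (by omega) hhB (by omega) m2
        obtain ⟨e4, m4⟩ := hIH m.2.1 (h - m.1) _ (by omega) (by omega) (by omega) (by omega) (by omega) m3
        simp only [if_pos (⟨g2a, g2b⟩ : w - m.2.1 ≥ 0 ∧ h - m.1 ≥ 0)]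
        exact ⟨by rw [e1, e2, e3, e4], m4⟩
      · simp only [if_neg g2]
        exact ⟨by rw [e1, e2], m2⟩
    · exact (False.elim (by omega))
  · simp only [if_neg g1]
    by_cases g2 : w - m.2.1 ≥ 0 ∧ h - m.1 ≥ 0
    · obtain ⟨g2a, g2b⟩ := g2
      rcases hmok with ⟨ha, hb⟩ | ⟨hi1, hi2⟩
      · obtain ⟨e3, m3⟩ := hIH (w - m.2.1) h memo (by omega) hh (by omega) hhB (by omega) hm
        obtain ⟨e4, m4⟩ := hIH m.2.1 (h - m.1) _ (by omega) (by omega) (by omega) (by omega) (by omega) m3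
        simp only [if_pos (⟨g2a, g2b⟩ : w - m.2.1 ≥ 0 ∧ h - m.1 ≥ 0)]
        exact ⟨by rw [e3, e4], m4⟩
      · exact (False.elim (by omega))
    · simp only [if_neg g2]
      exact ⟨by trivial, hm⟩

lemma bFold (M : List (Int × Int × Int)) (R C : Int) (n : Nat) (w h : Int)
    (hIH : ∀ (w' h' : Int) (memo : PySem.Dict (Int × Int) Int), 0 ≤ w' → 0 ≤ h' →
      w' ≤ R - 1 → h' ≤ C - 1 → (w' + h').toNat < n → MInvB M memo →
      (bestGo M n memo w' h').1 = tkaV M w' h' ∧ MInvB M (bestGo M n memo w' h').2)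
    (hw : 0 ≤ w) (hh : 0 ≤ h) (hwB : w ≤ R - 1) (hhB : h ≤ C - 1) (hfn : (w + h).toNat ≤ n) :
    ∀ (L : List (Int × Int × Int)), (∀ m ∈ L, (1 ≤ m.1 ∧ 1 ≤ m.2.1) ∨
      (¬ (m.1 ≤ R - 1 ∧ m.2.1 ≤ C - 1) ∧ ¬ (m.2.1 ≤ R - 1 ∧ m.1 ≤ C - 1))) →
    ∀ (res : Int) (memo : PySem.Dict (Int × Int) Int), MInvB M memo →
      (L.foldl (bStep M n w h) (res, memo)).1 = L.foldl (bPure M w h) res ∧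
      MInvB M (L.foldl (bStep M n w h) (res, memo)).2 := by
  intro L
  induction L with
  | nil => exact fun _ res memo hm => ⟨rfl, hm⟩
  | cons m L IHL =>
    intro hpL res memo hm
    obtain ⟨hstep1, hstep2⟩ := bStep_eq M R C n w h hIH m (hpL m (by simp))
      hw hh hwB hhB hfn res memo hm
    simp only [List.foldl_cons]
    have hrw : bStep M n w h (res, memo) m
        = (bPure M w h res m, (bStep M n w h (res, memo) m).2) := by
      rw [← hstep1]
    rw [hrw]
    exact IHL (fun m' hm' => hpL m' (List.mem_cons_of_mem _ hm')) _ _ hstep2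

lemma foldl_bPure (M : List (Int × Int × Int)) (w h : Int) :
    ∀ (L : List (Int × Int × Int)) (res : Int), 0 ≤ res →
      L.foldl (bPure M w h) res = L.foldl (aPure M w h) res := by
  intro L
  induction L with
  | nil => intro res _; rfl
  | cons m L IHL =>
    intro res hres
    simp only [List.foldl_cons]
    have hstep : bPure M w h res m = aPure M w h res m := by
      unfold bPure bPureH aPure
      split_ifs <;> (simp only [Int.max_def]; split_ifs <;> omega)
    rw [hstep]
    exact IHL _ (le_trans hres (le_max_left _ _))

lemma bestGo_main (M : List (Int × Int × Int)) (R C : Int) (hok : tkaOk R C M) :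
    ∀ (fuel : Nat) (w h : Int) (memo : PySem.Dict (Int × Int) Int),
      0 ≤ w → 0 ≤ h → w ≤ R - 1 → h ≤ C - 1 → (w + h).toNat < fuel → MInvB M memo →
      (bestGo M fuel memo w h).1 = tkaV M w h ∧ MInvB M (bestGo M fuel memo w h).2 := by
  intro fuel
  induction fuel with
  | zero => intro w h memo _ _ _ _ hf _; omega
  | succ n IHn =>
    intro w h memo hw hh hwB hhB hf hm
    cases hget : memo.get? (w, h) with
    | some x =>
      rw [bestGo_succ_some M n memo w h x hget]
      exact ⟨hm (w, h) x hget, hm⟩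
    | none =>
      rw [bestGo_succ_none M n memo w h hget]
      obtain ⟨hf1, hf2⟩ := bFold M R C n w h IHn hw hh hwB hhB (by omega) M hok 0 memo hm
      have hval : (M.foldl (bStep M n w h) (0, memo)).1 = tkaV M w h := by
        rw [hf1, foldl_bPure M w h M 0 le_rfl, ← tkaV_rec M R C hok w h hw hh hwB hhB]
      refine ⟨hval, ?_⟩
      intro p x hx
      rw [PySem.Dict.get?_insert] at hx
      by_cases hp : p = (w, h)
      · rw [if_pos hp] at hx
        cases hx
        rw [hval, hp]
      · rw [if_neg hp] at hx
        exact hf2 p x hx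

-- ---------- A side ----------

def ShapeA (R C : Int) (dp : List (List Int)) : Prop :=
  dp.length = R.toNat ∧ ∀ row ∈ dp, row.length = C.toNat

def InvA (M : List (Int × Int × Int)) (R C : Int) (dp : List (List Int)) (s w : Int) : Prop :=
  ShapeA R C dp ∧
  ∀ i j : Int, 0 ≤ i → i < R → 0 ≤ j → j < C →
    cellA dp i j = if i < s ∨ (i = s ∧ j < w) then tkaV M i j else 0

lemma pyGetD_toNat {α : Type} (xs : List α) (i : Int) (d : α) (h0 : 0 ≤ i)
    (h1 : i.toNat < xs.length) : PySem.List.pyGetD xs i d = xs.getD i.toNat d := by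
  rw [PySem.List.pyGetD_eq_getElem xs d h0 (by omega), List.getD_eq_getElem xs d h1]

lemma getD_set_eq {α : Type} (l : List α) (n : Nat) (a d : α) (h : n < l.length) :
    (l.set n a).getD n d = a := by
  rw [List.getD_eq_getElem?_getD, List.getElem?_set_self h]; rfl

lemma getD_set_ne {α : Type} (l : List α) (n m : Nat) (a d : α) (h : n ≠ m) :
    (l.set n a).getD m d = l.getD m d := by
  rw [List.getD_eq_getElem?_getD, List.getElem?_set_ne h, ← List.getD_eq_getElem?_getD]

lemma cellA_getD (R C : Int) (dp : List (List Int)) (hsh : ShapeA R C dp)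
    (i j : Int) (hi : 0 ≤ i) (hiR : i < R) (hj : 0 ≤ j) (hjC : j < C) :
    cellA dp i j = (dp.getD i.toNat []).getD j.toNat 0 := by
  obtain ⟨hlen, hrow⟩ := hsh
  have hiN : i.toNat < dp.length := by omega
  have hr : (dp.getD i.toNat []).length = C.toNat := by
    rw [List.getD_eq_getElem dp [] hiN]; exact hrow _ (dp.getElem_mem hiN)
  unfold cellA
  rw [pyGetD_toNat dp i [] hi hiN, pyGetD_toNat _ j 0 hj (by omega)]

lemma setCellA_getD (R C : Int) (dp : List (List Int)) (hsh : ShapeA R C dp)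
    (s w : Int) (hs : 0 ≤ s) (hsR : s < R) (hw : 0 ≤ w) (v : Int) :
    setCellA dp s w v = dp.set s.toNat ((dp.getD s.toNat []).set w.toNat v) := by
  obtain ⟨hlen, hrow⟩ := hsh
  have hsN : s.toNat < dp.length := by omega
  unfold setCellA
  rw [PySem.List.pySetD_of_nonneg _ _ hs, pyGetD_toNat dp s [] hs hsN,
      PySem.List.pySetD_of_nonneg _ _ hw]

lemma shape_setCellA (R C : Int) (dp : List (List Int)) (hsh : ShapeA R C dp)
    (s w : Int) (hs : 0 ≤ s) (hsR : s < R) (hw : 0 ≤ w) (_hwC : w < C) (v : Int) :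
    ShapeA R C (setCellA dp s w v) := by
  rw [setCellA_getD R C dp hsh s w hs hsR hw v]
  obtain ⟨hlen, hrow⟩ := hsh
  have hsN : s.toNat < dp.length := by omega
  constructor
  · rw [List.length_set]; exact hlen
  · intro row hmem
    rcases List.mem_or_eq_of_mem_set hmem with hm | hm
    · exact hrow row hm
    · rw [hm, List.length_set, List.getD_eq_getElem dp [] hsN]
      exact hrow _ (dp.getElem_mem hsN)

lemma cellA_set (R C : Int) (dp : List (List Int))
    (hsh : ShapeA R C dp) (s w : Int) (hs : 0 ≤ s) (hsR : s < R) (hw : 0 ≤ w) (hwC : w < C)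
    (v : Int) (i j : Int) (hi : 0 ≤ i) (hiR : i < R) (hj : 0 ≤ j) (hjC : j < C) :
    cellA (setCellA dp s w v) i j = if i = s ∧ j = w then v else cellA dp i j := by
  have hsh' := shape_setCellA R C dp hsh s w hs hsR hw hwC v
  rw [cellA_getD R C _ hsh' i j hi hiR hj hjC, setCellA_getD R C dp hsh s w hs hsR hw v,
      cellA_getD R C dp hsh i j hi hiR hj hjC]
  obtain ⟨hlen, hrow⟩ := hsh
  have hsN : s.toNat < dp.length := by omega
  have hrowlen : (dp.getD s.toNat []).length = C.toNat := by
    rw [List.getD_eq_getElem dp [] hsN]; exact hrow _ (dp.getElem_mem hsN)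
  by_cases his : i = s
  · subst his
    rw [getD_set_eq _ _ _ _ (by omega)]
    by_cases hjw : j = w
    · subst hjw
      rw [getD_set_eq _ _ _ _ (by omega), if_pos ⟨rfl, rfl⟩]
    · rw [getD_set_ne _ _ _ _ _ (by omega), if_neg (fun hc => hjw hc.2)]
  · rw [getD_set_ne _ _ _ _ _ (by omega), if_neg (fun hc => his hc.1)]

lemma setCellA_collapse (R C : Int) (dp : List (List Int)) (hsh : ShapeA R C dp)
    (s w : Int) (hs : 0 ≤ s) (hsR : s < R) (hw : 0 ≤ w) (hwC : w < C) (res v : Int) :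
    setCellA (setCellA dp s w res) s w v = setCellA dp s w v := by
  have hsh' := shape_setCellA R C dp hsh s w hs hsR hw hwC res
  rw [setCellA_getD R C _ hsh' s w hs hsR hw v, setCellA_getD R C dp hsh s w hs hsR hw res,
      setCellA_getD R C dp hsh s w hs hsR hw v]
  obtain ⟨hlen, hrow⟩ := hsh
  have hsN : s.toNat < dp.length := by omega
  rw [getD_set_eq _ _ _ _ (by omega), List.set_set, List.set_set]

lemma setCellA_self (R C : Int) (dp : List (List Int)) (hsh : ShapeA R C dp)
    (s w : Int) (hs : 0 ≤ s) (hsR : s < R) (hw : 0 ≤ w) (hwC : w < C) :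
    setCellA dp s w (cellA dp s w) = dp := by
  rw [setCellA_getD R C dp hsh s w hs hsR hw _, cellA_getD R C dp hsh s w hs hsR hw hwC]
  obtain ⟨hlen, hrow⟩ := hsh
  have hsN : s.toNat < dp.length := by omega
  have hrowlen : (dp.getD s.toNat []).length = C.toNat := by
    rw [List.getD_eq_getElem dp [] hsN]; exact hrow _ (dp.getElem_mem hsN)
  rw [List.getD_eq_getElem _ 0 (by omega), List.set_getElem_self,
      List.getD_eq_getElem dp [] (by omega), List.set_getElem_self]

-- A's k-step with finalized reads from the pre-step table
def aStepCell (dp : List (List Int)) (s w res : Int) (m : Int × Int × Int) : Int :=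
  max res (max
    (if s - m.1 ≥ 0 ∧ w - m.2.1 ≥ 0 then
      m.2.2 + cellA dp (s - m.1) w + cellA dp m.1 (w - m.2.1) else 0)
    (if s - m.2.1 ≥ 0 ∧ w - m.1 ≥ 0 then
      m.2.2 + cellA dp (s - m.2.1) w + cellA dp m.2.1 (w - m.1) else 0))

lemma tkaBody_set (R C : Int) (dp : List (List Int)) (hsh : ShapeA R C dp)
    (s w : Int) (hs : 0 ≤ s) (hsR : s < R) (hw : 0 ≤ w) (hwC : w < C)
    (m : Int × Int × Int)
    (hmok : (1 ≤ m.1 ∧ 1 ≤ m.2.1) ∨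
      (¬ (m.1 ≤ R - 1 ∧ m.2.1 ≤ C - 1) ∧ ¬ (m.2.1 ≤ R - 1 ∧ m.1 ≤ C - 1)))
    (res : Int) :
    tkaBody s w (setCellA dp s w res) m = setCellA dp s w (aStepCell dp s w res m) := by
  unfold tkaBody aStepCell
  have e0 : cellA (setCellA dp s w res) s w = res := by
    rw [cellA_set R C dp hsh s w hs hsR hw hwC res s w hs hsR hw hwC, if_pos ⟨rfl, rfl⟩]
  have eH : (if s - m.1 ≥ 0 ∧ w - m.2.1 ≥ 0 then
        m.2.2 + cellA (setCellA dp s w res) (s - m.1) w + cellA (setCellA dp s w res) m.1 (w - m.2.1) else 0)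
      = (if s - m.1 ≥ 0 ∧ w - m.2.1 ≥ 0 then
        m.2.2 + cellA dp (s - m.1) w + cellA dp m.1 (w - m.2.1) else 0) := by
    split_ifs with hg
    · obtain ⟨hg1, hg2⟩ := hg
      rcases hmok with ⟨ha, hb⟩ | ⟨hi1, hi2⟩
      · rw [cellA_set R C dp hsh s w hs hsR hw hwC res (s - m.1) w (by omega) (by omega) hw hwC,
            if_neg (by omega : ¬ (s - m.1 = s ∧ w = w)),
            cellA_set R C dp hsh s w hs hsR hw hwC res m.1 (w - m.2.1) (by omega) (by omega) (by omega) (by omega),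
            if_neg (by omega : ¬ (m.1 = s ∧ w - m.2.1 = w))]
      · exact (False.elim (by omega))
    · rfl
  have eV : (if s - m.2.1 ≥ 0 ∧ w - m.1 ≥ 0 then
        m.2.2 + cellA (setCellA dp s w res) (s - m.2.1) w + cellA (setCellA dp s w res) m.2.1 (w - m.1) else 0)
      = (if s - m.2.1 ≥ 0 ∧ w - m.1 ≥ 0 then
        m.2.2 + cellA dp (s - m.2.1) w + cellA dp m.2.1 (w - m.1) else 0) := by
    split_ifs with hg
    · obtain ⟨hg1, hg2⟩ := hg
      rcases hmok with ⟨ha, hb⟩ | ⟨hi1, hi2⟩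
      · rw [cellA_set R C dp hsh s w hs hsR hw hwC res (s - m.2.1) w (by omega) (by omega) hw hwC,
            if_neg (by omega : ¬ (s - m.2.1 = s ∧ w = w)),
            cellA_set R C dp hsh s w hs hsR hw hwC res m.2.1 (w - m.1) (by omega) (by omega) (by omega) (by omega),
            if_neg (by omega : ¬ (m.2.1 = s ∧ w - m.1 = w))]
      · exact (False.elim (by omega))
    · rfl
  rw [eH, eV, e0, setCellA_collapse R C dp hsh s w hs hsR hw hwC res]

lemma foldl_tkaBody_set (R C : Int) (dp : List (List Int)) (hsh : ShapeA R C dp)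
    (s w : Int) (hs : 0 ≤ s) (hsR : s < R) (hw : 0 ≤ w) (hwC : w < C) :
    ∀ (L : List (Int × Int × Int)), (∀ m ∈ L, (1 ≤ m.1 ∧ 1 ≤ m.2.1) ∨
      (¬ (m.1 ≤ R - 1 ∧ m.2.1 ≤ C - 1) ∧ ¬ (m.2.1 ≤ R - 1 ∧ m.1 ≤ C - 1))) → ∀ res : Int,
      L.foldl (tkaBody s w) (setCellA dp s w res) = setCellA dp s w (L.foldl (aStepCell dp s w) res) := by
  intro L
  induction L with
  | nil => intro _ res; rfl
  | cons m L IHL =>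
    intro hpL res
    simp only [List.foldl_cons]
    rw [tkaBody_set R C dp hsh s w hs hsR hw hwC m (hpL m (by simp)) res]
    exact IHL (fun m' hm' => hpL m' (List.mem_cons_of_mem _ hm')) _

lemma tkaInner_eq (M : List (Int × Int × Int)) (R C : Int) (hok : tkaOk R C M)
    (dp : List (List Int)) (s w : Int) (hs : 0 ≤ s) (hsR : s < R) (hw : 0 ≤ w) (hwC : w < C)
    (hInv : InvA M R C dp s w) :
    tkaInner M s w dp = setCellA dp s w (tkaV M s w) := by
  obtain ⟨hsh, hcell⟩ := hInv
  unfold tkaInner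
  rw [PySem.List.foldl_pyRange_zero_pyGetD M (0, 0, 0) (tkaBody s w) dp]
  have h0 : cellA dp s w = 0 := by
    rw [hcell s w hs hsR hw hwC, if_neg (by omega)]
  conv_lhs => rw [← setCellA_self R C dp hsh s w hs hsR hw hwC]
  rw [foldl_tkaBody_set R C dp hsh s w hs hsR hw hwC M hok (cellA dp s w), h0]
  congr 1
  rw [tkaV_rec M R C hok s w hs hw (by omega) (by omega)]
  refine PySem.List.foldl_congr_mem _ _ _ _ ?_
  intro acc x hx
  unfold aStepCell aPure
  have eH : (if s - x.1 ≥ 0 ∧ w - x.2.1 ≥ 0 then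
        x.2.2 + cellA dp (s - x.1) w + cellA dp x.1 (w - x.2.1) else 0)
      = (if s - x.1 ≥ 0 ∧ w - x.2.1 ≥ 0 then
        x.2.2 + tkaV M (s - x.1) w + tkaV M x.1 (w - x.2.1) else 0) := by
    split_ifs with hg
    · obtain ⟨hg1, hg2⟩ := hg
      rcases hok x hx with ⟨ha, hb⟩ | ⟨hi1, hi2⟩
      · rw [hcell (s - x.1) w (by omega) (by omega) hw hwC, if_pos (by omega),
            hcell x.1 (w - x.2.1) (by omega) (by omega) (by omega) (by omega), if_pos (by omega)]
      · exact (False.elim (by omega))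
    · rfl
  have eV : (if s - x.2.1 ≥ 0 ∧ w - x.1 ≥ 0 then
        x.2.2 + cellA dp (s - x.2.1) w + cellA dp x.2.1 (w - x.1) else 0)
      = (if s - x.2.1 ≥ 0 ∧ w - x.1 ≥ 0 then
        x.2.2 + tkaV M (s - x.2.1) w + tkaV M x.2.1 (w - x.1) else 0) := by
    split_ifs with hg
    · obtain ⟨hg1, hg2⟩ := hg
      rcases hok x hx with ⟨ha, hb⟩ | ⟨hi1, hi2⟩
      · rw [hcell (s - x.2.1) w (by omega) (by omega) hw hwC, if_pos (by omega),
            hcell x.2.1 (w - x.1) (by omega) (by omega) (by omega) (by omega), if_pos (by omega)]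
      · exact (False.elim (by omega))
    · rfl
  rw [eH, eV]

lemma InvA_tkaInner (M : List (Int × Int × Int)) (R C : Int) (hok : tkaOk R C M)
    (dp : List (List Int)) (s w : Int) (hs : 0 ≤ s) (hsR : s < R) (hw : 0 ≤ w) (hwC : w < C)
    (hInv : InvA M R C dp s w) : InvA M R C (tkaInner M s w dp) s (w + 1) := by
  rw [tkaInner_eq M R C hok dp s w hs hsR hw hwC hInv]
  obtain ⟨hsh, hcell⟩ := hInv
  refine ⟨shape_setCellA R C dp hsh s w hs hsR hw hwC _, ?_⟩
  intro i j hi hiR hj hjC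
  rw [cellA_set R C dp hsh s w hs hsR hw hwC _ i j hi hiR hj hjC]
  by_cases hij : i = s ∧ j = w
  · obtain ⟨rfl, rfl⟩ := hij
    rw [if_pos ⟨rfl, rfl⟩, if_pos (Or.inr ⟨rfl, by omega⟩)]
  · rw [if_neg hij, hcell i j hi hiR hj hjC]
    split_ifs <;> first | rfl | (exfalso; omega)

lemma rowLoop (M : List (Int × Int × Int)) (R C : Int) (hok : tkaOk R C M)
    (s : Int) (hs : 0 ≤ s) (hsR : s < R) :
    ∀ (n : Nat) (dp : List (List Int)) (w : Int), 0 ≤ w → w + n = C → InvA M R C dp s w →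
      InvA M R C ((PySem.List.pyRange w C 1).foldl (fun dp wys => tkaInner M s wys dp) dp) s C := by
  intro n
  induction n with
  | zero =>
    intro dp w hw hwC hInv
    rw [PySem.List.pyRange_one_eq_nil (show C ≤ w by omega), List.foldl_nil]
    have hwc : w = C := by omega
    rw [hwc] at hInv; exact hInv
  | succ n IHn =>
    intro dp w hw hwC hInv
    rw [PySem.List.pyRange_one_cons (show w < C by omega), List.foldl_cons]
    exact IHn _ (w + 1) (by omega) (by omega)
      (InvA_tkaInner M R C hok dp s w hs hsR hw (by omega) hInv)

lemma InvA_shift (M : List (Int × Int × Int)) (R C : Int) (dp : List (List Int)) (s : Int)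
    (hInv : InvA M R C dp s C) : InvA M R C dp (s + 1) 0 := by
  obtain ⟨hsh, hcell⟩ := hInv
  refine ⟨hsh, ?_⟩
  intro i j hi hiR hj hjC
  rw [hcell i j hi hiR hj hjC]
  split_ifs <;> first | rfl | (exfalso; omega)

lemma colLoop (M : List (Int × Int × Int)) (R C : Int) (hok : tkaOk R C M) (hC : 0 ≤ C) :
    ∀ (n : Nat) (dp : List (List Int)) (s : Int), 0 ≤ s → s + n = R → InvA M R C dp s 0 →
      InvA M R C ((PySem.List.pyRange s R 1).foldl (fun dp szer =>
        (PySem.List.pyRange 0 C 1).foldl (fun dp wys => tkaInner M szer wys dp) dp) dp) R 0 := by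
  intro n
  induction n with
  | zero =>
    intro dp s hs hsR hInv
    rw [PySem.List.pyRange_one_eq_nil (show R ≤ s by omega), List.foldl_nil]
    have hsr : s = R := by omega
    rw [hsr] at hInv; exact hInv
  | succ n IHn =>
    intro dp s hs hsR hInv
    rw [PySem.List.pyRange_one_cons (show s < R by omega), List.foldl_cons]
    refine IHn _ (s + 1) (by omega) (by omega) ?_
    exact InvA_shift M R C _ s
      (rowLoop M R C hok s hs (by omega) C.toNat dp 0 le_rfl (by omega) hInv)

lemma InvA_init (M : List (Int × Int × Int)) (R C : Int) (hR : 0 ≤ R) (hC : 0 ≤ C) :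
    InvA M R C ((PySem.List.pyRange 0 R 1).map (fun _ =>
      (PySem.List.pyRange 0 C 1).map (fun _ => (0 : Int)))) 0 0 := by
  constructor
  · constructor
    · rw [List.length_map, PySem.List.length_pyRange_one]; omega
    · intro row hrow
      obtain ⟨_, _, rfl⟩ := List.mem_map.mp hrow
      rw [List.length_map, PySem.List.length_pyRange_one]; omega
  · intro i j hi hiR hj hjC
    rw [if_neg (by omega)]
    unfold cellA
    rw [PySem.List.pyGetD_eq_getElem _ [] hi
        (by rw [List.length_map, PySem.List.length_pyRange_one]; omega)]
    rw [List.getElem_map]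
    rw [PySem.List.pyGetD_eq_getElem _ 0 hj
        (by rw [List.length_map, PySem.List.length_pyRange_one]; omega)]
    rw [List.getElem_map]

-- ===== VERDICT (by name: the statement is the Claim_ definition above) =====
theorem tkanina_spec : Claim_equal_tkanina := by
  intro P M _hdom hpre
  obtain ⟨hP1, hP2, hpre3⟩ := hpre
  have hok : tkaOk (P.1 + 1) (P.2 + 1) M := by
    intro m hm
    rcases hpre3 m hm with hp | ⟨hi1, hi2⟩
    · exact Or.inl hp
    · exact Or.inr (by constructor <;> omega)
  unfold Spec_tkanina
  have hA : tkanina P M = tkaV M P.1 P.2 := by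
    unfold tkanina
    have hfin := colLoop M (P.1 + 1) (P.2 + 1) hok (by omega) ((P.1 + 1).toNat)
      ((PySem.List.pyRange 0 (P.1 + 1) 1).map (fun _ =>
        (PySem.List.pyRange 0 (P.2 + 1) 1).map (fun _ => (0 : Int)))) 0 le_rfl (by omega)
      (InvA_init M (P.1 + 1) (P.2 + 1) (by omega) (by omega))
    rw [hfin.2 P.1 P.2 hP1 (by omega) hP2 (by omega), if_pos (Or.inl (by omega))]
  have hB : tkanina_alt P M = tkaV M P.1 P.2 :=
    (bestGo_main M (P.1 + 1) (P.2 + 1) hok ((P.1 + P.2).toNat + 1) P.1 P.2 PySem.Dict.empty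
      hP1 hP2 (by omega) (by omega) (by omega)
      (fun p x hx => by rw [PySem.Dict.get?_empty] at hx; cases hx)).1
  rw [hA, hB]
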